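-- pv_equiv track=rewrite | github.com/marquesarthur/programming_problems | leetcode/amazon/2020/subfolders.py | _can_add
-- ===== SOURCE A (Python) =====
-- def _can_add(f, subfolders, folder_map):
--     k = len(subfolders)
--     for i in range(1, k+1):
--         test = ''.join(reversed(f)).split("/", i)[-1]
--         test = ''.join(reversed(test))
--         if test in folder_map:
--             return False
--     return True
-- ===== SOURCE B (Python) =====
-- def _can_add(f, subfolders, folder_map):
--     # Strip one trailing "/"-component per step with rfind (A rebuilds every
--     # ancestor by reversing/splitting/reversing the whole path each iteration);
--     # stop early once no "/" is left, since further tests repeat the same string.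
--     t = f
--     for _ in subfolders:
--         j = t.rfind("/")
--         if j != -1:
--             t = t[:j]
--         if t in folder_map:
--             return False
--         if j == -1:
--             break
--     return True
-- ===== Notes on version B (the rewrite author's own statement) =====
-- stated objective: faster
-- what changed: B keeps the current ancestor as mutable state and strips one trailing "/"-component per iteration with rfind, breaking out as soon as no "/" remains (further tests would repeat the same string), instead of A's per-iteration reverse-whole-string / split-with-maxsplit / reverse-again recomputation for all k iterations.
import Mathlib
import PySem

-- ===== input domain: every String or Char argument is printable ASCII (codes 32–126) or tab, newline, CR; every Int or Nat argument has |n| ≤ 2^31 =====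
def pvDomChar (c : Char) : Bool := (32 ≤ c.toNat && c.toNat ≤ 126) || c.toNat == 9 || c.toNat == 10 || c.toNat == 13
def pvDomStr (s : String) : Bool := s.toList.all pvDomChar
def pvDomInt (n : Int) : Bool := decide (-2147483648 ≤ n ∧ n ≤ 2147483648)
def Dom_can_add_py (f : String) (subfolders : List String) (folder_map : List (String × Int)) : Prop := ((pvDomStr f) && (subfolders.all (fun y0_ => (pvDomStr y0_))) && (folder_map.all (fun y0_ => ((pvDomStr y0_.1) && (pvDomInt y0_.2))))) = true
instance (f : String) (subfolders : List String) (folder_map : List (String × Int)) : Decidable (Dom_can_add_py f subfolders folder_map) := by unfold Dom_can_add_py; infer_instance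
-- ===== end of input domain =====

-- B strips one trailing "/"-component per step with rfind, breaking early once
-- no "/" is left, instead of A's per-iteration reverse/split/reverse of the
-- whole path; same result.

-- `test in folder_map` : key membership in the dict (association list)
def pvMemKey (fm : List (String × Int)) (t : List Char) : Bool :=
  fm.any (fun p => p.1 == String.ofList t)

-- ===== PORT A =====
def canAddLoopA (fc : List Char) (fm : List (String × Int)) : List Int → Bool
  | [] => true
  | i :: rest =>
      -- test = ''.join(reversed(f)).split("/", i)[-1]; test = ''.join(reversed(test))
      -- [-1] is pyGet? at -1; the split result is never empty, so getD [] is exact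
      let test := ((PySem.List.pyGet? (PySem.Chars.splitOnMax fc.reverse ['/'] i) (-1)).getD []).reverse
      if pvMemKey fm test then false
      else canAddLoopA fc fm rest

def can_add_py (f : String) (subfolders : List String) (folder_map : List (String × Int)) : Bool :=
  let k : Int := subfolders.length
  canAddLoopA f.toList folder_map (PySem.List.pyRange 1 (k + 1) 1)

-- ===== PORT B =====
-- one loop step per element of subfolders (only the count matters): j = t.rfind("/");
-- if j != -1: t = t[:j]; if t in folder_map: return False; if j == -1: break
def canAddStripB (fm : List (String × Int)) : List Char → Nat → Bool
  | _, 0 => true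
  | t, Nat.succ r =>
      let j := PySem.Chars.rfind t ['/']
      let t2 := if j = -1 then t else PySem.List.slice t none (some j)
      if pvMemKey fm t2 then false
      else if j = -1 then true
      else canAddStripB fm t2 r

def can_add_py_alt (f : String) (subfolders : List String) (folder_map : List (String × Int)) : Bool :=
  canAddStripB folder_map f.toList subfolders.length

-- ===== PRECONDITION & SPEC =====
def Spec_can_add_py (f : String) (subfolders : List String) (folder_map : List (String × Int)) (out : Bool) : Prop := out = can_add_py_alt f subfolders folder_map
instance (f : String) (subfolders : List String) (folder_map : List (String × Int)) (out : Bool) : Decidable (Spec_can_add_py f subfolders folder_map out) := by unfold Spec_can_add_py; infer_instance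

-- ===== CLAIM (what is proved, stated in full; the proofs are below) =====
def Claim_equal_can_add_py : Prop := ∀ (f : String) (subfolders : List String) (folder_map : List (String × Int)), Dom_can_add_py f subfolders folder_map → Spec_can_add_py f subfolders folder_map (can_add_py f subfolders folder_map)

-- ===== LEMMAS AND PROOFS =====

-- simple accumulator-free mirrors of PySem's fuel-based split loop
def splitInf (c : Char) : List Char → List Char → List (List Char)
  | cur, [] => [cur]
  | cur, a :: t => if a = c then cur :: splitInf c [] t else splitInf c (cur ++ [a]) t

def splitRem (c : Char) : Nat → List Char → List Char → List (List Char)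
  | 0, cur, l => [cur ++ l]
  | _+1, cur, [] => [cur]
  | m+1, cur, a :: t => if a = c then cur :: splitRem c m [] t else splitRem c (m+1) (cur ++ [a]) t

def lastRem (c : Char) : Nat → List Char → List Char → List Char
  | 0, cur, l => cur ++ l
  | _+1, cur, [] => cur
  | m+1, cur, a :: t => if a = c then lastRem c m [] t else lastRem c (m+1) (cur ++ [a]) t

theorem splitOnMax_go_spec (c : Char) (fuel : Nat) :
    ∀ (m : Nat) (l cur : List Char) (accs : List (List Char)), l.length < fuel →
      PySem.Chars.splitOnMax.go [c] fuel m l cur accs = accs.reverse ++ splitRem c m cur.reverse l := by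
  induction fuel with
  | zero => intro m l cur accs h; omega
  | succ fuel ih =>
    intro m l cur accs h
    match l with
    | [] => cases m <;> simp [PySem.Chars.splitOnMax.go, splitRem]
    | a :: t =>
      rw [PySem.Chars.splitOnMax.go]
      have hpre : [c].isPrefixOf (a :: t) = (a == c) := by
        simp [List.isPrefixOf]; exact ⟨fun h => h.symm, fun h => h.symm⟩
      rw [hpre]
      simp only [List.length_cons, Nat.succ_lt_succ_iff] at h
      match m with
      | 0 => simp [splitRem]
      | m + 1 =>
        simp only [Nat.succ_ne_zero, Nat.add_sub_cancel]
        by_cases hac : a = c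
        · subst hac
          simp only [beq_self_eq_true, if_pos, List.length_cons, List.length_nil,
            List.drop_succ_cons, List.drop_zero]
          rw [ih m t [] (cur.reverse :: accs) (by omega)]
          simp [splitRem]
        · simp only [beq_iff_eq, hac, ite_false]
          rw [ih (m+1) t (a :: cur) accs (by omega)]
          simp [splitRem, hac]

theorem splitOnMax_eq (c : Char) (cs : List Char) (i : Int) (hi : 0 ≤ i) :
    PySem.Chars.splitOnMax cs [c] i = splitRem c i.toNat [] cs := by
  rw [PySem.Chars.splitOnMax, if_neg (by omega)]
  exact (splitOnMax_go_spec c (cs.length + 1) i.toNat cs [] [] (by omega)).trans (by simp)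

theorem splitRem_ne_nil (c : Char) (m : Nat) (cur l : List Char) : splitRem c m cur l ≠ [] := by
  induction l generalizing m cur with
  | nil => cases m <;> simp [splitRem]
  | cons a t ih =>
    cases m with
    | zero => simp [splitRem]
    | succ m => rw [splitRem]; split_ifs <;> simp [ih]

theorem splitInf_ne_nil (c : Char) (cur l : List Char) : splitInf c cur l ≠ [] := by
  induction l generalizing cur with
  | nil => simp [splitInf]
  | cons a t ih => rw [splitInf]; split_ifs <;> simp [ih]

theorem getLast_splitRem (c : Char) (m : Nat) (cur l : List Char)
    (hne : splitRem c m cur l ≠ []) :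
    (splitRem c m cur l).getLast hne = lastRem c m cur l := by
  induction l generalizing m cur with
  | nil => cases m <;> simp [splitRem, lastRem]
  | cons a t ih =>
    cases m with
    | zero => simp [splitRem, lastRem]
    | succ m =>
      rw [lastRem]
      simp only [splitRem]
      split_ifs with hac
      · rw [List.getLast_cons (splitRem_ne_nil c m [] t)]; exact ih m []  (splitRem_ne_nil c m [] t)
      · exact ih (m+1) (cur ++ [a]) (splitRem_ne_nil c (m+1) (cur ++ [a]) t)

theorem intercalate_cons_ne (c : Char) (x : List Char) (L : List (List Char)) (h : L ≠ []) :
    [c].intercalate (x :: L) = x ++ c :: [c].intercalate L := by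
  cases L with
  | nil => exact absurd rfl h
  | cons y r => simp [List.intercalate]

theorem join_splitInf (c : Char) (cs cur : List Char) :
    [c].intercalate (splitInf c cur cs) = cur ++ cs := by
  induction cs generalizing cur with
  | nil => simp [splitInf, List.intercalate]
  | cons a t ih =>
    rw [splitInf]
    split_ifs with hac
    · subst hac
      rw [intercalate_cons_ne _ _ _ (splitInf_ne_nil _ [] t), ih []]
      simp
    · rw [ih]; simp

theorem notMem_splitInf (c : Char) (cs cur : List Char) (hc : c ∉ cur) :
    ∀ p ∈ splitInf c cur cs, c ∉ p := by
  induction cs generalizing cur with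
  | nil => simpa [splitInf] using hc
  | cons a t ih =>
    rw [splitInf]
    split_ifs with hac
    · intro p hp
      rcases List.mem_cons.1 hp with rfl | hp
      · exact hc
      · exact ih [] (by simp) p hp
    · exact ih (cur ++ [a]) (by simp [hc]; exact fun h => hac h.symm)

theorem lastRem_append (c : Char) (m : Nat) (w : List Char) (hw : c ∉ w) :
    ∀ (cur l : List Char), lastRem c m cur (w ++ l) = lastRem c m (cur ++ w) l := by
  induction w with
  | nil => intro cur l; simp
  | cons a t ih =>
    intro cur l
    simp only [List.mem_cons, not_or] at hw
    cases m with
    | zero => simp [lastRem]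
    | succ m =>
      rw [List.cons_append, lastRem, if_neg (by exact fun h => hw.1 h.symm)]
      rw [ih hw.2 (cur ++ [a]) l]
      simp

theorem intercalate_append_singleton (c : Char) (p : List Char) :
    ∀ (L : List (List Char)), L ≠ [] →
      [c].intercalate (L ++ [p]) = [c].intercalate L ++ c :: p := by
  intro L
  induction L with
  | nil => intro h; exact absurd rfl h
  | cons q qs ih =>
    intro _
    cases qs with
    | nil => simp [List.intercalate]
    | cons r rs =>
      rw [List.cons_append, intercalate_cons_ne c q _ (by simp),
        intercalate_cons_ne c q _ (by simp), ih (by simp)]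
      simp

theorem lastRem_join (c : Char) (parts : List (List Char)) :
    ∀ (m : Nat), parts ≠ [] → (∀ p ∈ parts, c ∉ p) →
    lastRem c m [] ([c].intercalate parts).reverse
      = ([c].intercalate (parts.take (max (parts.length - m) 1))).reverse := by
  induction parts using List.reverseRecOn with
  | nil => intro m h; exact absurd rfl h
  | append_singleton ps p ih =>
    intro m _ hfree
    cases ps with
    | nil =>
      have hp : c ∉ p := hfree p (by simp)
      have hrev : c ∉ p.reverse := by simpa using hp
      simp only [List.nil_append]
      have hic : [c].intercalate [p] = p := by simp [List.intercalate]
      rw [hic]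
      cases m with
      | zero => simp [lastRem, List.intercalate]
      | succ m =>
        have h2 := lastRem_append c (m+1) p.reverse hrev [] []
        simp only [List.append_nil, List.nil_append] at h2
        rw [h2]
        simp [lastRem, List.intercalate]
    | cons q qs =>
      have hL : (q :: qs) ≠ ([] : List (List Char)) := by simp
      have hp : c ∉ p := hfree p (by simp)
      have hrev : c ∉ p.reverse := by simpa using hp
      rw [intercalate_append_singleton c p (q :: qs) hL]
      have hrw : ([c].intercalate (q :: qs) ++ c :: p).reverse
          = p.reverse ++ c :: ([c].intercalate (q :: qs)).reverse := by simp
      rw [hrw]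
      cases m with
      | zero =>
        have : max ((q :: qs ++ [p]).length - 0) 1 = (q :: qs ++ [p]).length := by
          simp
        rw [this, List.take_length, lastRem]
        rw [intercalate_append_singleton c p (q :: qs) hL]
        simp
      | succ m =>
        rw [lastRem_append c (m+1) p.reverse hrev [] _, lastRem, if_pos rfl]
        rw [ih m (by simp) (fun x hx => hfree x (by simp at hx ⊢; tauto))]
        have htake : List.take (max ((q :: qs ++ [p]).length - (m+1)) 1) (q :: qs ++ [p])
            = List.take (max ((q :: qs).length - m) 1) (q :: qs) := by
          have h1 : max ((q :: qs ++ [p]).length - (m+1)) 1 = max ((q :: qs).length - m) 1 := by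
            simp
          rw [h1]
          refine List.take_append_of_le_length ?_
          simp
        rw [htake]

-- A's i-th test string is the "/"-join of the first max(n-i,1) components
theorem test_eq (cs : List Char) (i : Int) (hi : 1 ≤ i) :
    ((PySem.List.pyGet? (PySem.Chars.splitOnMax cs.reverse ['/'] i) (-1)).getD []).reverse
      = [('/' : Char)].intercalate
          ((splitInf '/' [] cs).take (max ((splitInf '/' [] cs).length - i.toNat) 1)) := by
  have hne : splitInf '/' [] cs ≠ [] := splitInf_ne_nil _ _ _
  have hjoin : [('/' : Char)].intercalate (splitInf '/' [] cs) = cs := by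
    simpa using join_splitInf '/' cs []
  have hfree : ∀ p ∈ splitInf '/' [] cs, ('/' : Char) ∉ p :=
    notMem_splitInf '/' cs [] (by simp)
  rw [PySem.List.pyGet?_neg_one, splitOnMax_eq '/' cs.reverse i (by omega)]
  rw [List.getLast?_eq_some_getLast (splitRem_ne_nil '/' i.toNat [] cs.reverse),
    Option.getD_some, getLast_splitRem]
  have hcs : cs.reverse = ([('/' : Char)].intercalate (splitInf '/' [] cs)).reverse := by
    rw [hjoin]
  rw [hcs, lastRem_join '/' (splitInf '/' [] cs) i.toNat hne hfree, List.reverse_reverse]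

theorem loopA_all (fc : List Char) (fm : List (String × Int)) (is : List Int) :
    canAddLoopA fc fm is = is.all (fun i =>
      !(pvMemKey fm ((PySem.List.pyGet? (PySem.Chars.splitOnMax fc.reverse ['/'] i) (-1)).getD []).reverse)) := by
  induction is with
  | nil => rfl
  | cons i rest ih =>
    simp only [canAddLoopA, List.all_cons]
    cases h : pvMemKey fm ((PySem.List.pyGet? (PySem.Chars.splitOnMax fc.reverse ['/'] i) (-1)).getD []).reverse <;>
      simp [ih]

theorem all_congr_mem {α : Type} (xs : List α) (p q : α → Bool) (h : ∀ x ∈ xs, p x = q x) :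
    xs.all p = xs.all q := by
  induction xs with
  | nil => rfl
  | cons a t ih => simp only [List.all_cons, h a (by simp), ih (fun x hx => h x (by simp [hx]))]

theorem all_const {α : Type} (l : List α) (h : l ≠ []) (b : Bool) :
    l.all (fun _ => b) = b := by
  cases l with
  | nil => exact absurd rfl h
  | cons a t => cases b <;> simp

-- range(1, K+1) as a Nat-range of successors
theorem pyRange_one_all (K : Nat) (q : Int → Bool) :
    (PySem.List.pyRange 1 ((K : Int) + 1) 1).all q
      = (List.range K).all (fun i => q ((i : Int) + 1)) := by
  induction K with
  | zero => rw [PySem.List.pyRange_one_eq_nil (by omega)]; rfl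
  | succ K ih =>
    have hcast : ((K + 1 : Nat) : Int) + 1 = ((K : Int) + 1) + 1 := by push_cast; ring
    rw [hcast, PySem.List.pyRange_one_succ_right (by omega), List.range_succ,
      List.all_append, List.all_append, ih]
    simp

-- ===== rfind on '/'-joined components =====

theorem rfind_go_none (s : List Char) (j : Nat)
    (h : ∀ i, i ≤ j → ¬ (['/'].isPrefixOf (s.drop i) = true)) :
    PySem.Chars.rfind.go s ['/'] j = -1 := by
  induction j with
  | zero =>
    rw [PySem.Chars.rfind.go]
    exact if_neg (by simpa using h 0 (by omega))
  | succ j ih =>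
    rw [PySem.Chars.rfind.go, if_neg (h (j+1) (by omega))]
    exact ih (fun i hi => h i (by omega))

theorem rfind_go_found (s : List Char) (j : Nat)
    (hj : ['/'].isPrefixOf (s.drop j) = true) :
    ∀ (m : Nat), j ≤ m → (∀ i, j < i → i ≤ m → ¬ (['/'].isPrefixOf (s.drop i) = true)) →
      PySem.Chars.rfind.go s ['/'] m = (j : Int) := by
  intro m
  induction m with
  | zero =>
    intro hjm _
    have : j = 0 := by omega
    subst this
    rw [PySem.Chars.rfind.go, if_pos (by simpa using hj)]
    simp
  | succ m ih =>
    intro hjm hab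
    by_cases hje : j = m + 1
    · subst hje
      rw [PySem.Chars.rfind.go, if_pos hj]
    · rw [PySem.Chars.rfind.go, if_neg (hab (m+1) (by omega) (by omega))]
      exact ih (by omega) (fun i h1 h2 => hab i h1 (by omega))

theorem prefix_slash_mem (s : List Char) (i : Nat)
    (h : ['/'].isPrefixOf (s.drop i) = true) : ('/' : Char) ∈ s := by
  have hpre : (['/'] : List Char) <+: s.drop i := List.isPrefixOf_iff_prefix.1 h
  have : ('/' : Char) ∈ s.drop i := hpre.subset (by simp)
  exact List.drop_subset i s this

theorem rfind_of_not_mem (s : List Char) (h : ('/' : Char) ∉ s) :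
    PySem.Chars.rfind s ['/'] = -1 := by
  rw [PySem.Chars.rfind]
  exact rfind_go_none s s.length (fun i _ hp => h (prefix_slash_mem s i hp))

theorem rfind_append_single (xs p : List Char) (hp : ('/' : Char) ∉ p) :
    PySem.Chars.rfind (xs ++ '/' :: p) ['/'] = (xs.length : Int) := by
  rw [PySem.Chars.rfind]
  refine rfind_go_found (xs ++ '/' :: p) xs.length ?_ _ (by simp) ?_
  · rw [List.drop_left]
    simp [List.isPrefixOf]
  · intro i h1 h2 hpre
    have hdrop : (xs ++ '/' :: p).drop i = p.drop (i - xs.length - 1) := by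
      rw [List.drop_append]
      rw [List.drop_eq_nil_of_le (by omega), List.nil_append]
      have h3 : i - xs.length = (i - xs.length - 1) + 1 := by omega
      rw [h3, List.drop_succ_cons]
      have h4 : i - xs.length - 1 + 1 - 1 = i - xs.length - 1 := by omega
      rw [h4]
    rw [hdrop] at hpre
    have : ('/' : Char) ∈ p.drop (i - xs.length - 1) :=
      (List.isPrefixOf_iff_prefix.1 hpre).subset (by simp)
    exact hp (List.drop_subset _ p this)

theorem slice_append_single (xs p : List Char) :
    PySem.List.slice (xs ++ '/' :: p) none (some (xs.length : Int)) = xs := by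
  rw [PySem.List.slice_to _ (by omega : (0:Int) ≤ (xs.length : Int))]
  simp [List.take_left]

-- ===== B's loop over the joined prefixes =====

theorem stripB_spec (fm : List (String × Int)) (parts : List (List Char))
    (hfree : ∀ p ∈ parts, ('/' : Char) ∉ p) :
    ∀ (r m : Nat), 1 ≤ m → m ≤ parts.length →
      canAddStripB fm ([('/' : Char)].intercalate (parts.take m)) r
        = (List.range r).all
            (fun i => !(pvMemKey fm ([('/' : Char)].intercalate (parts.take (max (m - (i+1)) 1))))) := by
  intro r
  induction r with
  | zero => intro m _ _; rfl
  | succ r ih =>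
    intro m hm1 hmn
    have hconst_arg : ∀ i : Nat, max (m - (i+1)) 1 = 1 ∨ 2 ≤ m := by
      intro i; by_cases h : 2 ≤ m
      · right; exact h
      · left; omega
    by_cases h2 : 2 ≤ m
    · -- m = m' + 1 with 1 ≤ m'
      obtain ⟨m', rfl⟩ : ∃ m', m = m' + 1 := ⟨m - 1, by omega⟩
      have hm'1 : 1 ≤ m' := by omega
      have hm'lt : m' < parts.length := by omega
      have htake : parts.take (m' + 1) = parts.take m' ++ [parts[m']] := by
        rw [List.take_succ, List.getElem?_eq_getElem hm'lt]
        rfl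
      have htne : parts.take m' ≠ [] := by
        rw [Ne, List.take_eq_nil_iff]
        push_neg
        constructor
        · omega
        · intro h; rw [h] at hm'lt; simp at hm'lt
      have hpm : ('/' : Char) ∉ parts[m'] := hfree _ (List.getElem_mem hm'lt)
      have hj : PySem.Chars.rfind ([('/' : Char)].intercalate (parts.take (m'+1))) ['/']
          = (([('/' : Char)].intercalate (parts.take m')).length : Int) := by
        rw [htake, intercalate_append_singleton _ _ _ htne]
        exact rfind_append_single _ _ hpm
      have hjne : (([('/' : Char)].intercalate (parts.take m')).length : Int) ≠ -1 := by omega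
      have hslice : PySem.List.slice ([('/' : Char)].intercalate (parts.take (m'+1))) none
            (some (([('/' : Char)].intercalate (parts.take m')).length : Int))
          = [('/' : Char)].intercalate (parts.take m') := by
        rw [htake, intercalate_append_singleton _ _ _ htne]
        exact slice_append_single _ _
      rw [canAddStripB]
      simp only [hj, if_neg hjne, hslice]
      rw [List.range_succ_eq_map, List.all_cons, List.all_map]
      have hhead : max (m' + 1 - (0+1)) 1 = m' := by omega
      rw [hhead]
      have htail : (List.range r).all
            ((fun i => !(pvMemKey fm ([('/' : Char)].intercalate (parts.take (max (m' + 1 - (i+1)) 1))))) ∘ Nat.succ)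
          = (List.range r).all
            (fun i => !(pvMemKey fm ([('/' : Char)].intercalate (parts.take (max (m' - (i+1)) 1))))) := by
        refine all_congr_mem _ _ _ ?_
        intro i _
        simp only [Function.comp]
        have : m' + 1 - (Nat.succ i + 1) = m' - (i + 1) := by omega
        rw [this]
      rw [htail, ← ih m' hm'1 (by omega)]
      cases hmem : pvMemKey fm ([('/' : Char)].intercalate (parts.take m')) <;> simp [hmem]
    · -- m = 1 : the test string is the first component, no '/' left
      have hm : m = 1 := by omega
      subst hm
      have hq : ('/' : Char) ∉ [('/' : Char)].intercalate (parts.take 1) := by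
        cases parts with
        | nil => simp at hmn
        | cons q qs =>
          simp only [List.take_succ_cons, List.take_zero]
          have : [('/' : Char)].intercalate [q] = q := by simp [List.intercalate]
          rw [this]
          exact hfree q (by simp)
      have hj : PySem.Chars.rfind ([('/' : Char)].intercalate (parts.take 1)) ['/'] = -1 :=
        rfind_of_not_mem _ hq
      rw [canAddStripB]
      simp only [hj, if_pos rfl]
      have hrhs : (List.range (r+1)).all
            (fun i => !(pvMemKey fm ([('/' : Char)].intercalate (parts.take (max (1 - (i+1)) 1)))))
          = !(pvMemKey fm ([('/' : Char)].intercalate (parts.take 1))) := by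
        rw [all_congr_mem _ _ (fun _ => !(pvMemKey fm ([('/' : Char)].intercalate (parts.take 1))))
            (by intro i _
                show (!(pvMemKey fm ([('/' : Char)].intercalate (parts.take (max (1 - (i+1)) 1)))))
                  = (!(pvMemKey fm ([('/' : Char)].intercalate (parts.take 1))))
                have h1 : max (1 - (i+1)) 1 = 1 := by omega
                rw [h1])]
        exact all_const _ (by simp) _
      rw [hrhs]
      cases hmem : pvMemKey fm ([('/' : Char)].intercalate (parts.take 1)) <;> simp [hmem]

-- ===== VERDICT (by name: the statement is the Claim_ definition above) =====
theorem can_add_py_spec : Claim_equal_can_add_py := by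
  intro f subfolders folder_map _
  unfold Spec_can_add_py can_add_py can_add_py_alt
  simp only []
  rw [loopA_all]
  set parts := splitInf '/' [] f.toList with hparts
  have hne : parts ≠ [] := splitInf_ne_nil '/' [] f.toList
  have hn1 : 1 ≤ parts.length := by
    cases h : parts with
    | nil => exact absurd h hne
    | cons a t => simp
  have hfree : ∀ p ∈ parts, ('/' : Char) ∉ p := notMem_splitInf '/' f.toList [] (by simp)
  have hjoin : [('/' : Char)].intercalate parts = f.toList := by
    simpa using join_splitInf '/' f.toList []
  set K : Nat := subfolders.length with hK
  -- A's tests, rewritten through test_eq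
  have hA : ∀ i ∈ PySem.List.pyRange 1 ((K : Int) + 1) 1,
      (!(pvMemKey folder_map ((PySem.List.pyGet? (PySem.Chars.splitOnMax f.toList.reverse ['/'] i) (-1)).getD []).reverse))
      = (!(pvMemKey folder_map ([('/' : Char)].intercalate (parts.take (max (parts.length - i.toNat) 1))))) := by
    intro i hi
    rw [PySem.List.mem_pyRange_one] at hi
    rw [test_eq f.toList i hi.1]
  rw [all_congr_mem _ _ _ hA, pyRange_one_all K]
  have hB : ∀ i ∈ List.range K,
      (!(pvMemKey folder_map ([('/' : Char)].intercalate (parts.take (max (parts.length - ((i : Int) + 1).toNat) 1)))))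
      = (!(pvMemKey folder_map ([('/' : Char)].intercalate (parts.take (max (parts.length - (i+1)) 1))))) := by
    intro i _
    have : ((i : Int) + 1).toNat = i + 1 := by omega
    rw [this]
  rw [all_congr_mem _ _ _ hB, ← stripB_spec folder_map parts hfree K parts.length hn1 (le_refl _)]
  rw [List.take_length, hjoin]
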